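-- pv_equiv track=rewrite | github.com/Anthony-Sin/fi | src/desktop_automation_agent/agents/hierarchical_task_decomposer.py | _infer_module
-- ===== SOURCE A (Python) =====
-- def _infer_module(description: str) -> str:
--     normalized = description.casefold()
--     if any(token in normalized for token in ("launch", "open", "start app", "browser", "go to", "navigate to")):
--         return "application_launcher"
--     if any(token in normalized for token in ("account", "login", "profile", "credential", "session")):
--         return "account_rotation_orchestrator"
--     if any(token in normalized for token in ("chat", "prompt", "ai", "llm", "assistant", "ask")):
--         return "ai_interface_navigator"
--     if any(token in normalized for token in ("extract", "collect", "read", "capture")):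
--         return "structured_data_extractor"
--     if any(token in normalized for token in ("fill", "enter", "submit", "form")):
--         return "form_automation"
--     if any(token in normalized for token in ("navigate", "click", "scroll", "verify", "wait")):
--         return "navigation_step_sequencer"
--     if any(token in normalized for token in ("switch", "handoff", "clipboard", "workflow")):
--         return "multi_application_workflow_coordinator"
--     return "desktop_automation"
-- ===== SOURCE B (Python) =====
-- # Single left-to-right scan over the text: at each position, match every keyword
-- # with str.startswith and keep the minimum priority seen; priorities encode the
-- # original branch order, so the minimum matched priority is the first branch
-- # that would have fired.
--
-- _KEYWORD_PRIORITY = {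
--     "launch": 0, "open": 0, "start app": 0, "browser": 0, "go to": 0, "navigate to": 0,
--     "account": 1, "login": 1, "profile": 1, "credential": 1, "session": 1,
--     "chat": 2, "prompt": 2, "ai": 2, "llm": 2, "assistant": 2, "ask": 2,
--     "extract": 3, "collect": 3, "read": 3, "capture": 3,
--     "fill": 4, "enter": 4, "submit": 4, "form": 4,
--     "navigate": 5, "click": 5, "scroll": 5, "verify": 5, "wait": 5,
--     "switch": 6, "handoff": 6, "clipboard": 6, "workflow": 6,
-- }
--
-- _MODULES = (
--     "application_launcher",
--     "account_rotation_orchestrator",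
--     "ai_interface_navigator",
--     "structured_data_extractor",
--     "form_automation",
--     "navigation_step_sequencer",
--     "multi_application_workflow_coordinator",
-- )
--
--
-- def _infer_module(description: str) -> str:
--     text = description.casefold()
--     best = len(_MODULES)
--     for i in range(len(text)):
--         for keyword, priority in _KEYWORD_PRIORITY.items():
--             if priority < best and text.startswith(keyword, i):
--                 best = priority
--     return _MODULES[best] if best < len(_MODULES) else "desktop_automation"
-- ===== Notes on version B (the rewrite author's own statement) =====
-- stated objective: alternative
-- what changed: Instead of A's seven ordered group checks each running its own substring searches, B makes one left-to-right scan over the text, matching all keywords at each position via startswith and keeping the minimum priority matched; the minimum priority equals A's first firing branch.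
import Mathlib
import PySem

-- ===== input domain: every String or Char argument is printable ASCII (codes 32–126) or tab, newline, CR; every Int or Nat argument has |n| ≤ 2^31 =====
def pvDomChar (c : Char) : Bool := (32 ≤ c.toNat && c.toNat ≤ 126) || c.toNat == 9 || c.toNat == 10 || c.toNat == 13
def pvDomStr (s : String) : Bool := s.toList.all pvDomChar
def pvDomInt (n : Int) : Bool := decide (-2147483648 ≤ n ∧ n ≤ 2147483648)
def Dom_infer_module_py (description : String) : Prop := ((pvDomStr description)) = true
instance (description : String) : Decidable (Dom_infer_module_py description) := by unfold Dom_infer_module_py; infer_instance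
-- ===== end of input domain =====

-- B replaces A's seven ordered per-group substring checks by a single left-to-right scan over the
-- text that matches every keyword at each position and keeps the minimum priority (objective: alternative).


-- ===== PORT A =====
-- casefold on the ASCII domain coincides with lower; PySem.Str.lower is exact there.
def infer_module_py (description : String) : String :=
  let normalized := PySem.Str.lower description
  if (["launch", "open", "start app", "browser", "go to", "navigate to"].any
      (fun token => PySem.Str.isIn token normalized)) then "application_launcher"
  else if (["account", "login", "profile", "credential", "session"].any
      (fun token => PySem.Str.isIn token normalized)) then "account_rotation_orchestrator"
  else if (["chat", "prompt", "ai", "llm", "assistant", "ask"].any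
      (fun token => PySem.Str.isIn token normalized)) then "ai_interface_navigator"
  else if (["extract", "collect", "read", "capture"].any
      (fun token => PySem.Str.isIn token normalized)) then "structured_data_extractor"
  else if (["fill", "enter", "submit", "form"].any
      (fun token => PySem.Str.isIn token normalized)) then "form_automation"
  else if (["navigate", "click", "scroll", "verify", "wait"].any
      (fun token => PySem.Str.isIn token normalized)) then "navigation_step_sequencer"
  else if (["switch", "handoff", "clipboard", "workflow"].any
      (fun token => PySem.Str.isIn token normalized)) then "multi_application_workflow_coordinator"
  else "desktop_automation"

-- ===== PORT B =====
-- the flat keyword → priority dict, in Python insertion order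
def pvKeywordPriority : List (String × Nat) :=
  [("launch", 0), ("open", 0), ("start app", 0), ("browser", 0), ("go to", 0), ("navigate to", 0),
   ("account", 1), ("login", 1), ("profile", 1), ("credential", 1), ("session", 1),
   ("chat", 2), ("prompt", 2), ("ai", 2), ("llm", 2), ("assistant", 2), ("ask", 2),
   ("extract", 3), ("collect", 3), ("read", 3), ("capture", 3),
   ("fill", 4), ("enter", 4), ("submit", 4), ("form", 4),
   ("navigate", 5), ("click", 5), ("scroll", 5), ("verify", 5), ("wait", 5),
   ("switch", 6), ("handoff", 6), ("clipboard", 6), ("workflow", 6)]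

def pvModules : List String :=
  ["application_launcher", "account_rotation_orchestrator", "ai_interface_navigator",
   "structured_data_extractor", "form_automation", "navigation_step_sequencer",
   "multi_application_workflow_coordinator"]

-- text.startswith(keyword, i) with 0 ≤ i is exactly keyword.toList.isPrefixOf (text.drop i)
def infer_module_py_alt (description : String) : String :=
  let text := (PySem.Str.lower description).toList
  let best := (List.range text.length).foldl
    (fun best i =>
      pvKeywordPriority.foldl
        (fun b kp => if kp.2 < b && kp.1.toList.isPrefixOf (text.drop i) then kp.2 else b)
        best)
    pvModules.length
  if best < pvModules.length then pvModules.getD best "desktop_automation"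
  else "desktop_automation"

-- ===== PRECONDITION & SPEC =====
def Spec_infer_module_py (description : String) (out : String) : Prop := out = infer_module_py_alt description
instance (description : String) (out : String) : Decidable (Spec_infer_module_py description out) := by unfold Spec_infer_module_py; infer_instance

-- ===== CLAIM (what is proved, stated in full; the proofs are below) =====
def Claim_equal_infer_module_py : Prop := ∀ (description : String), Dom_infer_module_py description → Spec_infer_module_py description (infer_module_py description)

-- ===== LEMMAS AND PROOFS =====

-- the multiset of priorities matched anywhere in the text (proof-only helper)
def pvMatched (chars : List Char) : List Nat :=
  (List.range chars.length).flatMap (fun i =>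
    pvKeywordPriority.filterMap (fun kp =>
      if kp.1.toList.isPrefixOf (chars.drop i) then some kp.2 else none))

def pvModulesTokens : Nat → List String
  | 0 => ["launch", "open", "start app", "browser", "go to", "navigate to"]
  | 1 => ["account", "login", "profile", "credential", "session"]
  | 2 => ["chat", "prompt", "ai", "llm", "assistant", "ask"]
  | 3 => ["extract", "collect", "read", "capture"]
  | 4 => ["fill", "enter", "submit", "form"]
  | 5 => ["navigate", "click", "scroll", "verify", "wait"]
  | 6 => ["switch", "handoff", "clipboard", "workflow"]
  | _ => []

theorem pv_inner_eq (chars : List Char) (i : Nat) :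
    ∀ (l : List (String × Nat)) (b : Nat),
      l.foldl (fun b kp => if kp.2 < b && kp.1.toList.isPrefixOf (chars.drop i) then kp.2 else b) b
        = (l.filterMap (fun kp =>
            if kp.1.toList.isPrefixOf (chars.drop i) then some kp.2 else none)).foldl min b := by
  intro l
  induction l with
  | nil => intro b; rfl
  | cons kp t ih =>
    intro b
    cases hp : kp.1.toList.isPrefixOf (chars.drop i) with
    | true =>
      simp only [List.foldl_cons, List.filterMap_cons, hp, Bool.and_true, if_pos]
      rw [ih]
      congr 1
      simp only [Nat.min_def, decide_eq_true_eq]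
      split_ifs <;> omega
    | false =>
      simp only [List.foldl_cons, List.filterMap_cons, hp, Bool.and_false, Bool.false_eq_true,
        if_false]
      exact ih b

theorem pv_outer_eq (f : Nat → List Nat) :
    ∀ (is : List Nat) (b : Nat),
      is.foldl (fun b i => (f i).foldl min b) b = (is.flatMap f).foldl min b := by
  intro is
  induction is with
  | nil => intro b; rfl
  | cons i t ih => intro b; simp [List.foldl, List.flatMap_cons, List.foldl_append, ih]

theorem pv_best_eq (chars : List Char) :
    (List.range chars.length).foldl
      (fun best i =>
        pvKeywordPriority.foldl
          (fun b kp => if kp.2 < b && kp.1.toList.isPrefixOf (chars.drop i) then kp.2 else b)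
          best) 7
      = (pvMatched chars).foldl min 7 := by
  unfold pvMatched
  have hfun : (fun (best : Nat) (i : Nat) =>
      pvKeywordPriority.foldl
        (fun b kp => if kp.2 < b && kp.1.toList.isPrefixOf (chars.drop i) then kp.2 else b)
        best)
      = (fun (b : Nat) (i : Nat) =>
          (pvKeywordPriority.filterMap (fun kp =>
            if kp.1.toList.isPrefixOf (chars.drop i) then some kp.2 else none)).foldl min b) := by
    funext b i
    exact pv_inner_eq chars i pvKeywordPriority b
  rw [hfun, pv_outer_eq]

theorem pv_foldl_min_le_init : ∀ (l : List Nat) (b : Nat), l.foldl min b ≤ b := by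
  intro l
  induction l with
  | nil => intro b; exact Nat.le_refl b
  | cons a t ih =>
    intro b
    calc t.foldl min (min b a) ≤ min b a := ih (min b a)
      _ ≤ b := Nat.min_le_left _ _

theorem pv_foldl_min_le : ∀ (l : List Nat) (b x : Nat), x ∈ l → l.foldl min b ≤ x := by
  intro l
  induction l with
  | nil => intro b x h; cases h
  | cons a t ih =>
    intro b x h
    rcases List.mem_cons.mp h with rfl | h
    · calc t.foldl min (min b x) ≤ min b x := pv_foldl_min_le_init t (min b x)
        _ ≤ x := Nat.min_le_right _ _
    · exact ih _ _ h

theorem pv_foldl_min_choice : ∀ (l : List Nat) (b : Nat),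
    l.foldl min b = b ∨ l.foldl min b ∈ l := by
  intro l
  induction l with
  | nil => intro b; exact Or.inl rfl
  | cons a t ih =>
    intro b
    rcases ih (min b a) with h | h
    · rw [List.foldl_cons, h]
      rcases Nat.le_total b a with h1 | h1
      · exact Or.inl (Nat.min_eq_left h1)
      · exact Or.inr (by rw [Nat.min_eq_right h1]; exact List.mem_cons_self ..)
    · exact Or.inr (List.mem_cons_of_mem _ h)

theorem pv_mem_matched (chars : List Char) (g : Nat) :
    g ∈ pvMatched chars ↔
      ∃ kp ∈ pvKeywordPriority, kp.2 = g ∧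
        ∃ i, i < chars.length ∧ kp.1.toList.isPrefixOf (chars.drop i) = true := by
  simp only [pvMatched, List.mem_flatMap, List.mem_filterMap, List.mem_range]
  constructor
  · rintro ⟨i, hi, kp, hkp, hsome⟩
    by_cases hp : kp.1.toList.isPrefixOf (chars.drop i) = true
    · exact ⟨kp, hkp, by simpa [hp] using hsome, i, hi, hp⟩
    · simp [hp] at hsome
  · rintro ⟨kp, hkp, rfl, i, hi, hp⟩
    exact ⟨i, hi, kp, hkp, by simp [hp]⟩

theorem pv_exists_bounded (sub chars : List Char) (h : sub ≠ []) :
    (∃ i, i < chars.length ∧ sub.isPrefixOf (chars.drop i) = true) ↔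
      PySem.Chars.isIn sub chars = true := by
  rw [← PySem.Chars.exists_prefix_drop_iff_isIn]
  constructor
  · rintro ⟨i, _, hp⟩; exact ⟨i, List.isPrefixOf_iff_prefix.mp hp⟩
  · rintro ⟨j, hp⟩
    by_cases hj : j < chars.length
    · exact ⟨j, hj, List.isPrefixOf_iff_prefix.mpr hp⟩
    · exfalso
      rw [List.drop_eq_nil_of_le (Nat.le_of_not_lt hj)] at hp
      exact h (List.prefix_nil.mp hp)

theorem pv_mem_iff (chars : List Char) (g : Nat) :
    g ∈ pvMatched chars ↔
      ∃ kp ∈ pvKeywordPriority, kp.2 = g ∧ kp.1.toList <:+: chars := by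
  rw [pv_mem_matched]
  have hne : ∀ kp ∈ pvKeywordPriority, kp.1.toList ≠ [] := by decide
  constructor
  · rintro ⟨kp, hkp, hg, hex⟩
    exact ⟨kp, hkp, hg, (PySem.Chars.isIn_iff_infix _ _).mp
      ((pv_exists_bounded kp.1.toList chars (hne kp hkp)).mp hex)⟩
  · rintro ⟨kp, hkp, hg, hinf⟩
    exact ⟨kp, hkp, hg, (pv_exists_bounded kp.1.toList chars (hne kp hkp)).mpr
      ((PySem.Chars.isIn_iff_infix _ _).mpr hinf)⟩

theorem pv_mem_lt (chars : List Char) (g : Nat) (h : g ∈ pvMatched chars) : g < 7 := by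
  rcases (pv_mem_iff chars g).mp h with ⟨kp, hkp, hg, _⟩
  have : ∀ kp ∈ pvKeywordPriority, kp.2 < 7 := by decide
  exact hg ▸ this kp hkp

theorem pv_bridge0 (nm : String) :
    0 ∈ pvMatched nm.toList ↔
      ((["launch", "open", "start app", "browser", "go to", "navigate to"].any
        (fun token => PySem.Str.isIn token nm)) = true) := by
  rw [pv_mem_iff]
  simp only [pvKeywordPriority, List.mem_cons, List.not_mem_nil, or_false,
    List.any_cons, List.any_nil, Bool.or_eq_true, PySem.Str.isIn_iff_infix]
  constructor
  · rintro ⟨kp, hkp, h2, hinf⟩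
    rcases hkp with rfl|rfl|rfl|rfl|rfl|rfl|rfl|rfl|rfl|rfl|rfl|rfl|rfl|rfl|rfl|rfl|rfl|rfl|rfl|rfl|rfl|rfl|rfl|rfl|rfl|rfl|rfl|rfl|rfl|rfl|rfl|rfl|rfl|rfl <;> simp_all
  · rintro (h|h|h|h|h|(h|hf))
    · exact ⟨("launch", 0), by simp, rfl, h⟩
    · exact ⟨("open", 0), by simp, rfl, h⟩
    · exact ⟨("start app", 0), by simp, rfl, h⟩
    · exact ⟨("browser", 0), by simp, rfl, h⟩
    · exact ⟨("go to", 0), by simp, rfl, h⟩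
    · exact ⟨("navigate to", 0), by simp, rfl, h⟩
    · exact (Bool.false_ne_true hf).elim

theorem pv_bridge1 (nm : String) :
    1 ∈ pvMatched nm.toList ↔
      ((["account", "login", "profile", "credential", "session"].any
        (fun token => PySem.Str.isIn token nm)) = true) := by
  rw [pv_mem_iff]
  simp only [pvKeywordPriority, List.mem_cons, List.not_mem_nil, or_false,
    List.any_cons, List.any_nil, Bool.or_eq_true, PySem.Str.isIn_iff_infix]
  constructor
  · rintro ⟨kp, hkp, h2, hinf⟩
    rcases hkp with rfl|rfl|rfl|rfl|rfl|rfl|rfl|rfl|rfl|rfl|rfl|rfl|rfl|rfl|rfl|rfl|rfl|rfl|rfl|rfl|rfl|rfl|rfl|rfl|rfl|rfl|rfl|rfl|rfl|rfl|rfl|rfl|rfl|rfl <;> simp_all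
  · rintro (h|h|h|h|(h|hf))
    · exact ⟨("account", 1), by simp, rfl, h⟩
    · exact ⟨("login", 1), by simp, rfl, h⟩
    · exact ⟨("profile", 1), by simp, rfl, h⟩
    · exact ⟨("credential", 1), by simp, rfl, h⟩
    · exact ⟨("session", 1), by simp, rfl, h⟩
    · exact (Bool.false_ne_true hf).elim

theorem pv_bridge2 (nm : String) :
    2 ∈ pvMatched nm.toList ↔
      ((["chat", "prompt", "ai", "llm", "assistant", "ask"].any
        (fun token => PySem.Str.isIn token nm)) = true) := by
  rw [pv_mem_iff]
  simp only [pvKeywordPriority, List.mem_cons, List.not_mem_nil, or_false,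
    List.any_cons, List.any_nil, Bool.or_eq_true, PySem.Str.isIn_iff_infix]
  constructor
  · rintro ⟨kp, hkp, h2, hinf⟩
    rcases hkp with rfl|rfl|rfl|rfl|rfl|rfl|rfl|rfl|rfl|rfl|rfl|rfl|rfl|rfl|rfl|rfl|rfl|rfl|rfl|rfl|rfl|rfl|rfl|rfl|rfl|rfl|rfl|rfl|rfl|rfl|rfl|rfl|rfl|rfl <;> simp_all
  · rintro (h|h|h|h|h|(h|hf))
    · exact ⟨("chat", 2), by simp, rfl, h⟩
    · exact ⟨("prompt", 2), by simp, rfl, h⟩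
    · exact ⟨("ai", 2), by simp, rfl, h⟩
    · exact ⟨("llm", 2), by simp, rfl, h⟩
    · exact ⟨("assistant", 2), by simp, rfl, h⟩
    · exact ⟨("ask", 2), by simp, rfl, h⟩
    · exact (Bool.false_ne_true hf).elim

theorem pv_bridge3 (nm : String) :
    3 ∈ pvMatched nm.toList ↔
      ((["extract", "collect", "read", "capture"].any
        (fun token => PySem.Str.isIn token nm)) = true) := by
  rw [pv_mem_iff]
  simp only [pvKeywordPriority, List.mem_cons, List.not_mem_nil, or_false,
    List.any_cons, List.any_nil, Bool.or_eq_true, PySem.Str.isIn_iff_infix]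
  constructor
  · rintro ⟨kp, hkp, h2, hinf⟩
    rcases hkp with rfl|rfl|rfl|rfl|rfl|rfl|rfl|rfl|rfl|rfl|rfl|rfl|rfl|rfl|rfl|rfl|rfl|rfl|rfl|rfl|rfl|rfl|rfl|rfl|rfl|rfl|rfl|rfl|rfl|rfl|rfl|rfl|rfl|rfl <;> simp_all
  · rintro (h|h|h|(h|hf))
    · exact ⟨("extract", 3), by simp, rfl, h⟩
    · exact ⟨("collect", 3), by simp, rfl, h⟩
    · exact ⟨("read", 3), by simp, rfl, h⟩
    · exact ⟨("capture", 3), by simp, rfl, h⟩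
    · exact (Bool.false_ne_true hf).elim

theorem pv_bridge4 (nm : String) :
    4 ∈ pvMatched nm.toList ↔
      ((["fill", "enter", "submit", "form"].any
        (fun token => PySem.Str.isIn token nm)) = true) := by
  rw [pv_mem_iff]
  simp only [pvKeywordPriority, List.mem_cons, List.not_mem_nil, or_false,
    List.any_cons, List.any_nil, Bool.or_eq_true, PySem.Str.isIn_iff_infix]
  constructor
  · rintro ⟨kp, hkp, h2, hinf⟩
    rcases hkp with rfl|rfl|rfl|rfl|rfl|rfl|rfl|rfl|rfl|rfl|rfl|rfl|rfl|rfl|rfl|rfl|rfl|rfl|rfl|rfl|rfl|rfl|rfl|rfl|rfl|rfl|rfl|rfl|rfl|rfl|rfl|rfl|rfl|rfl <;> simp_all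
  · rintro (h|h|h|(h|hf))
    · exact ⟨("fill", 4), by simp, rfl, h⟩
    · exact ⟨("enter", 4), by simp, rfl, h⟩
    · exact ⟨("submit", 4), by simp, rfl, h⟩
    · exact ⟨("form", 4), by simp, rfl, h⟩
    · exact (Bool.false_ne_true hf).elim

theorem pv_bridge5 (nm : String) :
    5 ∈ pvMatched nm.toList ↔
      ((["navigate", "click", "scroll", "verify", "wait"].any
        (fun token => PySem.Str.isIn token nm)) = true) := by
  rw [pv_mem_iff]
  simp only [pvKeywordPriority, List.mem_cons, List.not_mem_nil, or_false,
    List.any_cons, List.any_nil, Bool.or_eq_true, PySem.Str.isIn_iff_infix]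
  constructor
  · rintro ⟨kp, hkp, h2, hinf⟩
    rcases hkp with rfl|rfl|rfl|rfl|rfl|rfl|rfl|rfl|rfl|rfl|rfl|rfl|rfl|rfl|rfl|rfl|rfl|rfl|rfl|rfl|rfl|rfl|rfl|rfl|rfl|rfl|rfl|rfl|rfl|rfl|rfl|rfl|rfl|rfl <;> simp_all
  · rintro (h|h|h|h|(h|hf))
    · exact ⟨("navigate", 5), by simp, rfl, h⟩
    · exact ⟨("click", 5), by simp, rfl, h⟩
    · exact ⟨("scroll", 5), by simp, rfl, h⟩
    · exact ⟨("verify", 5), by simp, rfl, h⟩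
    · exact ⟨("wait", 5), by simp, rfl, h⟩
    · exact (Bool.false_ne_true hf).elim

theorem pv_bridge6 (nm : String) :
    6 ∈ pvMatched nm.toList ↔
      ((["switch", "handoff", "clipboard", "workflow"].any
        (fun token => PySem.Str.isIn token nm)) = true) := by
  rw [pv_mem_iff]
  simp only [pvKeywordPriority, List.mem_cons, List.not_mem_nil, or_false,
    List.any_cons, List.any_nil, Bool.or_eq_true, PySem.Str.isIn_iff_infix]
  constructor
  · rintro ⟨kp, hkp, h2, hinf⟩
    rcases hkp with rfl|rfl|rfl|rfl|rfl|rfl|rfl|rfl|rfl|rfl|rfl|rfl|rfl|rfl|rfl|rfl|rfl|rfl|rfl|rfl|rfl|rfl|rfl|rfl|rfl|rfl|rfl|rfl|rfl|rfl|rfl|rfl|rfl|rfl <;> simp_all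
  · rintro (h|h|h|(h|hf))
    · exact ⟨("switch", 6), by simp, rfl, h⟩
    · exact ⟨("handoff", 6), by simp, rfl, h⟩
    · exact ⟨("clipboard", 6), by simp, rfl, h⟩
    · exact ⟨("workflow", 6), by simp, rfl, h⟩
    · exact (Bool.false_ne_true hf).elim

-- ===== VERDICT (by name: the statement is the Claim_ definition above) =====
theorem infer_module_py_spec : Claim_equal_infer_module_py := by
  intro description _
  unfold Spec_infer_module_py infer_module_py infer_module_py_alt
  set nm := PySem.Str.lower description with hnm
  set chars := nm.toList with hchars
  have h7 : pvModules.length = 7 := rfl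
  dsimp only
  rw [h7]
  rw [pv_best_eq chars]
  set r := (pvMatched chars).foldl min 7 with hr
  have hchoice : r = 7 ∨ r ∈ pvMatched chars := pv_foldl_min_choice _ _
  have hub : ∀ x ∈ pvMatched chars, r ≤ x := fun x hx => pv_foldl_min_le _ _ _ hx
  have hc : ∀ g : Nat, g < 7 →
      ((g ∈ pvMatched chars) ↔
        ((pvModulesTokens g).any (fun token => PySem.Str.isIn token nm)) = true) := by
    intro g hg
    interval_cases g
    · exact pv_bridge0 nm
    · exact pv_bridge1 nm
    · exact pv_bridge2 nm
    · exact pv_bridge3 nm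
    · exact pv_bridge4 nm
    · exact pv_bridge5 nm
    · exact pv_bridge6 nm
  by_cases h0 : ((pvModulesTokens 0).any (fun token => PySem.Str.isIn token nm)) = true
  · have hmem : 0 ∈ pvMatched chars := (hc 0 (by norm_num)).mpr h0
    have hr0 : r = 0 := Nat.le_zero.mp (hub 0 hmem)
    simp only [pvModulesTokens] at h0
    rw [if_pos h0, hr0]
    decide
  · rw [if_neg (by simpa only [pvModulesTokens] using h0)]
    by_cases h1 : ((pvModulesTokens 1).any (fun token => PySem.Str.isIn token nm)) = true
    · have hmem : 1 ∈ pvMatched chars := (hc 1 (by norm_num)).mpr h1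
      have hle : r ≤ 1 := hub 1 hmem
      have hr1 : r = 1 := by
        interval_cases r
        · exact absurd (h0 ((hc 0 (by norm_num)).mp (hchoice.resolve_left (by omega)))) (by simp)
        · rfl
      simp only [pvModulesTokens] at h1
      rw [if_pos h1, hr1]
      decide
    · rw [if_neg (by simpa only [pvModulesTokens] using h1)]
      by_cases h2 : ((pvModulesTokens 2).any (fun token => PySem.Str.isIn token nm)) = true
      · have hmem : 2 ∈ pvMatched chars := (hc 2 (by norm_num)).mpr h2
        have hle : r ≤ 2 := hub 2 hmem
        have hr2 : r = 2 := by
          interval_cases r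
          · exact absurd ((hc 0 (by norm_num)).mp (hchoice.resolve_left (by omega))) h0
          · exact absurd ((hc 1 (by norm_num)).mp (hchoice.resolve_left (by omega))) h1
          · rfl
        simp only [pvModulesTokens] at h2
        rw [if_pos h2, hr2]
        decide
      · rw [if_neg (by simpa only [pvModulesTokens] using h2)]
        by_cases h3 : ((pvModulesTokens 3).any (fun token => PySem.Str.isIn token nm)) = true
        · have hmem : 3 ∈ pvMatched chars := (hc 3 (by norm_num)).mpr h3
          have hle : r ≤ 3 := hub 3 hmem
          have hr3 : r = 3 := by
            interval_cases r
            · exact absurd ((hc 0 (by norm_num)).mp (hchoice.resolve_left (by omega))) h0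
            · exact absurd ((hc 1 (by norm_num)).mp (hchoice.resolve_left (by omega))) h1
            · exact absurd ((hc 2 (by norm_num)).mp (hchoice.resolve_left (by omega))) h2
            · rfl
          simp only [pvModulesTokens] at h3
          rw [if_pos h3, hr3]
          decide
        · rw [if_neg (by simpa only [pvModulesTokens] using h3)]
          by_cases h4 : ((pvModulesTokens 4).any (fun token => PySem.Str.isIn token nm)) = true
          · have hmem : 4 ∈ pvMatched chars := (hc 4 (by norm_num)).mpr h4
            have hle : r ≤ 4 := hub 4 hmem
            have hr4 : r = 4 := by
              interval_cases r
              · exact absurd ((hc 0 (by norm_num)).mp (hchoice.resolve_left (by omega))) h0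
              · exact absurd ((hc 1 (by norm_num)).mp (hchoice.resolve_left (by omega))) h1
              · exact absurd ((hc 2 (by norm_num)).mp (hchoice.resolve_left (by omega))) h2
              · exact absurd ((hc 3 (by norm_num)).mp (hchoice.resolve_left (by omega))) h3
              · rfl
            simp only [pvModulesTokens] at h4
            rw [if_pos h4, hr4]
            decide
          · rw [if_neg (by simpa only [pvModulesTokens] using h4)]
            by_cases h5 : ((pvModulesTokens 5).any (fun token => PySem.Str.isIn token nm)) = true
            · have hmem : 5 ∈ pvMatched chars := (hc 5 (by norm_num)).mpr h5
              have hle : r ≤ 5 := hub 5 hmem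
              have hr5 : r = 5 := by
                interval_cases r
                · exact absurd ((hc 0 (by norm_num)).mp (hchoice.resolve_left (by omega))) h0
                · exact absurd ((hc 1 (by norm_num)).mp (hchoice.resolve_left (by omega))) h1
                · exact absurd ((hc 2 (by norm_num)).mp (hchoice.resolve_left (by omega))) h2
                · exact absurd ((hc 3 (by norm_num)).mp (hchoice.resolve_left (by omega))) h3
                · exact absurd ((hc 4 (by norm_num)).mp (hchoice.resolve_left (by omega))) h4
                · rfl
              simp only [pvModulesTokens] at h5
              rw [if_pos h5, hr5]
              decide
            · rw [if_neg (by simpa only [pvModulesTokens] using h5)]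
              by_cases h6 : ((pvModulesTokens 6).any (fun token => PySem.Str.isIn token nm)) = true
              · have hmem : 6 ∈ pvMatched chars := (hc 6 (by norm_num)).mpr h6
                have hle : r ≤ 6 := hub 6 hmem
                have hr6 : r = 6 := by
                  interval_cases r
                  · exact absurd ((hc 0 (by norm_num)).mp (hchoice.resolve_left (by omega))) h0
                  · exact absurd ((hc 1 (by norm_num)).mp (hchoice.resolve_left (by omega))) h1
                  · exact absurd ((hc 2 (by norm_num)).mp (hchoice.resolve_left (by omega))) h2
                  · exact absurd ((hc 3 (by norm_num)).mp (hchoice.resolve_left (by omega))) h3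
                  · exact absurd ((hc 4 (by norm_num)).mp (hchoice.resolve_left (by omega))) h4
                  · exact absurd ((hc 5 (by norm_num)).mp (hchoice.resolve_left (by omega))) h5
                  · rfl
                simp only [pvModulesTokens] at h6
                rw [if_pos h6, hr6]
                decide
              · rw [if_neg (by simpa only [pvModulesTokens] using h6)]
                have hr7 : r = 7 := by
                  rcases hchoice with h | h
                  · exact h
                  · have hlt : r < 7 := pv_mem_lt chars r h
                    interval_cases r
                    · exact absurd ((hc 0 (by norm_num)).mp h) h0
                    · exact absurd ((hc 1 (by norm_num)).mp h) h1
                    · exact absurd ((hc 2 (by norm_num)).mp h) h2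
                    · exact absurd ((hc 3 (by norm_num)).mp h) h3
                    · exact absurd ((hc 4 (by norm_num)).mp h) h4
                    · exact absurd ((hc 5 (by norm_num)).mp h) h5
                    · exact absurd ((hc 6 (by norm_num)).mp h) h6
                rw [hr7]
                decide
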